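-- pv_equiv track=rewrite | github.com/wannabethere/asthera | unstructured_genieml_0.1.3/app/handlers/thread_handler.py | _is_summary_or_highlight_question
-- ===== SOURCE A (Python) =====
-- def _is_summary_or_highlight_question(prompt: str) -> bool:
--     """
--     Detect if the question is asking for a summary or highlights.
--
--     Args:
--         prompt: The user's question/prompt
--
--     Returns:
--         bool: True if this is a summary/highlight question, False otherwise
--     """
--     prompt_lower = prompt.lower().strip()
--
--     # Summary indicators
--     summary_keywords = [
--         'summary', 'summarize', 'summarise', 'sum up', 'overview', 'recap',
--         'brief', 'outline', 'gist', 'main points', 'key points', 'takeaways',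
--         'what happened', 'what was discussed', 'what did they talk about',
--         'give me a summary', 'can you summarize', 'provide a summary'
--     ]
--
--     # Highlight indicators
--     highlight_keywords = [
--         'highlight', 'highlights', 'key highlights', 'main highlights',
--         'important points', 'significant points', 'notable points',
--         'what stood out', 'most important', 'key insights', 'top insights',
--         'what were the highlights', 'show me the highlights'
--     ]
--
--     # General broad question indicators
--     broad_keywords = [
--         'tell me about', 'what about', 'everything about', 'all about',
--         'general overview', 'broad overview', 'complete picture',
--         'full picture', 'comprehensive view', 'overall view'
--     ]
--
--     all_keywords = summary_keywords + highlight_keywords + broad_keywords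
--
--     # Check if any of these keywords appear in the prompt
--     for keyword in all_keywords:
--         if keyword in prompt_lower:
--             return True
--
--     # Check for question patterns that typically ask for summaries
--     summary_patterns = [
--         'what was the call about',
--         'what did they discuss',
--         'what happened in the',
--         'what was covered',
--         'what topics were discussed',
--         'what were they talking about',
--         'give me an overview',
--         'can you give me',
--         'tell me what',
--         'what can you tell me'
--     ]
--
--     for pattern in summary_patterns:
--         if pattern in prompt_lower:
--             return True
--
--     return False
-- ===== SOURCE B (Python) =====
-- # B: single left-to-right pass over the prompt; at each position test all
-- # keywords at once as prefixes (one tuple startswith call per position),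
-- # instead of A's one full substring scan per keyword.
-- _KEYWORDS = (
--     'summary', 'summarize', 'summarise', 'sum up', 'overview', 'recap',
--     'brief', 'outline', 'gist', 'main points', 'key points', 'takeaways',
--     'what happened', 'what was discussed', 'what did they talk about',
--     'give me a summary', 'can you summarize', 'provide a summary',
--     'highlight', 'highlights', 'key highlights', 'main highlights',
--     'important points', 'significant points', 'notable points',
--     'what stood out', 'most important', 'key insights', 'top insights',
--     'what were the highlights', 'show me the highlights',
--     'tell me about', 'what about', 'everything about', 'all about',
--     'general overview', 'broad overview', 'complete picture',
--     'full picture', 'comprehensive view', 'overall view',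
--     'what was the call about', 'what did they discuss', 'what happened in the',
--     'what was covered', 'what topics were discussed',
--     'what were they talking about', 'give me an overview',
--     'can you give me', 'tell me what', 'what can you tell me',
-- )
--
-- def _is_summary_or_highlight_question(prompt: str) -> bool:
--     p = prompt.lower().strip()
--     for i in range(len(p) + 1):
--         if p.startswith(_KEYWORDS, i):
--             return True
--     return False
-- ===== Notes on version B (the rewrite author's own statement) =====
-- stated objective: alternative
-- what changed: A scans the whole lowered prompt once per keyword/pattern (51 separate substring searches); B makes a single left-to-right pass over the prompt positions and at each position tests all keywords at once as prefixes via one tuple startswith call.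
import Mathlib
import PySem

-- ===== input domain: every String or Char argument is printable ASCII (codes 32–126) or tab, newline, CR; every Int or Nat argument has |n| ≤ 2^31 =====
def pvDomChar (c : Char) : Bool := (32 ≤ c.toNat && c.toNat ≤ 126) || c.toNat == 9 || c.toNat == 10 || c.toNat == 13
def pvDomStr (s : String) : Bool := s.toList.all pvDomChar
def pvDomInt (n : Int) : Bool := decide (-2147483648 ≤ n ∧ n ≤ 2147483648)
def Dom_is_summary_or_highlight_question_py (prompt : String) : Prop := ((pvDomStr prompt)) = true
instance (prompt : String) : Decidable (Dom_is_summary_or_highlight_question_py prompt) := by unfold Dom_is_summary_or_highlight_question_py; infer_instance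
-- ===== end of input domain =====

-- B replaces A's per-keyword full substring scans by a single left-to-right pass that
-- tests all keywords as prefixes at each position (objective: alternative traversal).

-- ===== PORT A =====
def summaryKeywordsA : List String :=
  ["summary", "summarize", "summarise", "sum up", "overview", "recap",
   "brief", "outline", "gist", "main points", "key points", "takeaways",
   "what happened", "what was discussed", "what did they talk about",
   "give me a summary", "can you summarize", "provide a summary"]

def highlightKeywordsA : List String :=
  ["highlight", "highlights", "key highlights", "main highlights",
   "important points", "significant points", "notable points",
   "what stood out", "most important", "key insights", "top insights",
   "what were the highlights", "show me the highlights"]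

def broadKeywordsA : List String :=
  ["tell me about", "what about", "everything about", "all about",
   "general overview", "broad overview", "complete picture",
   "full picture", "comprehensive view", "overall view"]

def summaryPatternsA : List String :=
  ["what was the call about", "what did they discuss", "what happened in the",
   "what was covered", "what topics were discussed",
   "what were they talking about", "give me an overview",
   "can you give me", "tell me what", "what can you tell me"]

def is_summary_or_highlight_question_py (prompt : String) : Bool :=
  let promptLower := PySem.Str.strip (PySem.Str.lower prompt)
  -- 'for keyword in all_keywords: if keyword in prompt_lower: return True'
  if (summaryKeywordsA ++ highlightKeywordsA ++ broadKeywordsA).any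
       (fun keyword => PySem.Str.isIn keyword promptLower) then true
  -- 'for pattern in summary_patterns: if pattern in prompt_lower: return True'
  else if summaryPatternsA.any
       (fun pattern => PySem.Str.isIn pattern promptLower) then true
  else false

-- ===== PORT B =====
def bKeywords : List String :=
  ["summary", "summarize", "summarise", "sum up", "overview", "recap",
   "brief", "outline", "gist", "main points", "key points", "takeaways",
   "what happened", "what was discussed", "what did they talk about",
   "give me a summary", "can you summarize", "provide a summary",
   "highlight", "highlights", "key highlights", "main highlights",
   "important points", "significant points", "notable points",
   "what stood out", "most important", "key insights", "top insights",
   "what were the highlights", "show me the highlights",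
   "tell me about", "what about", "everything about", "all about",
   "general overview", "broad overview", "complete picture",
   "full picture", "comprehensive view", "overall view",
   "what was the call about", "what did they discuss", "what happened in the",
   "what was covered", "what topics were discussed",
   "what were they talking about", "give me an overview",
   "can you give me", "tell me what", "what can you tell me"]

-- 'for i in range(len(p)+1): if p.startswith(_KEYWORDS, i): return True' —
-- one pass over the positions of p, testing every keyword as a prefix there
def bScan : List Char → Bool
  | [] => bKeywords.any (fun k => PySem.Chars.startswith [] k.toList)
  | c :: t =>
      bKeywords.any (fun k => PySem.Chars.startswith (c :: t) k.toList) || bScan t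

def is_summary_or_highlight_question_py_alt (prompt : String) : Bool :=
  bScan (PySem.Str.strip (PySem.Str.lower prompt)).toList

-- ===== PRECONDITION & SPEC =====
def Spec_is_summary_or_highlight_question_py (prompt : String) (out : Bool) : Prop := out = is_summary_or_highlight_question_py_alt prompt
instance (prompt : String) (out : Bool) : Decidable (Spec_is_summary_or_highlight_question_py prompt out) := by unfold Spec_is_summary_or_highlight_question_py; infer_instance

-- ===== CLAIM (what is proved, stated in full; the proofs are below) =====
def Claim_equal_is_summary_or_highlight_question_py : Prop := ∀ (prompt : String), Dom_is_summary_or_highlight_question_py prompt → Spec_is_summary_or_highlight_question_py prompt (is_summary_or_highlight_question_py prompt)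

-- ===== LEMMAS AND PROOFS =====

-- B's keyword tuple is A's four lists concatenated, in order
theorem bKeywords_eq :
    bKeywords = (summaryKeywordsA ++ highlightKeywordsA ++ broadKeywordsA) ++ summaryPatternsA := by
  rfl

-- B's position scan finds exactly the keywords that occur as an infix
theorem bScan_iff (cs : List Char) :
    bScan cs = true ↔ ∃ k ∈ bKeywords, k.toList <:+: cs := by
  induction cs with
  | nil =>
      simp [bScan, List.any_eq_true, PySem.Chars.startswith_iff]
  | cons c t ih =>
      simp only [bScan, Bool.or_eq_true, List.any_eq_true,
        PySem.Chars.startswith_iff, ih, List.infix_cons_iff]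
      constructor
      · rintro (⟨k, hk, h⟩ | ⟨k, hk, h⟩)
        · exact ⟨k, hk, Or.inl h⟩
        · exact ⟨k, hk, Or.inr h⟩
      · rintro ⟨k, hk, h | h⟩
        · exact Or.inl ⟨k, hk, h⟩
        · exact Or.inr ⟨k, hk, h⟩

-- ===== VERDICT (by name: the statement is the Claim_ definition above) =====
theorem is_summary_or_highlight_question_py_spec : Claim_equal_is_summary_or_highlight_question_py := by
  intro prompt _
  unfold Spec_is_summary_or_highlight_question_py
  unfold is_summary_or_highlight_question_py is_summary_or_highlight_question_py_alt
  dsimp only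
  have hform : ∀ a b : Bool, (if a = true then true else if b = true then true else false) = (a || b) := by decide
  rw [hform, Bool.eq_iff_iff, bScan_iff, bKeywords_eq]
  simp only [Bool.or_eq_true, List.any_eq_true, PySem.Str.isIn_eq,
    PySem.Chars.isIn_iff_infix, List.mem_append]
  constructor
  · rintro (⟨k, hk, h⟩ | ⟨k, hk, h⟩)
    · exact ⟨k, Or.inl hk, h⟩
    · exact ⟨k, Or.inr hk, h⟩
  · rintro ⟨k, hk | hk, h⟩
    · exact Or.inl ⟨k, hk, h⟩
    · exact Or.inr ⟨k, hk, h⟩
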